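-- pv_equiv track=rewrite | github.com/Godeaux/Godot-AI-Bridge | sprite_demo.py | scale_up
-- ===== SOURCE A (Python) =====
-- def scale_up(pixels: list[list[tuple]], factor: int) -> list[list[tuple]]:
--     """Scale pixel grid by integer factor (nearest neighbor)."""
--     scaled = []
--     for row in pixels:
--         big_row = []
--         for px in row:
--             big_row.extend([px] * factor)
--         for _ in range(factor):
--             scaled.append(big_row[:])
--     return scaled
-- ===== SOURCE B (Python) =====
-- def scale_up(pixels: list[list[tuple]], factor: int) -> list[list[tuple]]:
--     """Scale pixel grid by integer factor (nearest neighbor), sampling each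
--     output coordinate back to its source via integer division."""
--     return [
--         [pixels[i // factor][j // factor]
--          for j in range(len(pixels[i // factor]) * factor)]
--         for i in range(len(pixels) * factor)
--     ]
-- ===== Notes on version B (the rewrite author's own statement) =====
-- stated objective: alternative
-- what changed: B replaces A's replicate-and-copy buffer building (extend with [px]*factor, then append row copies) by direct back-sampling: each output coordinate (i, j) reads pixels[i//factor][j//factor] in a single comprehension.
import Mathlib
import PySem

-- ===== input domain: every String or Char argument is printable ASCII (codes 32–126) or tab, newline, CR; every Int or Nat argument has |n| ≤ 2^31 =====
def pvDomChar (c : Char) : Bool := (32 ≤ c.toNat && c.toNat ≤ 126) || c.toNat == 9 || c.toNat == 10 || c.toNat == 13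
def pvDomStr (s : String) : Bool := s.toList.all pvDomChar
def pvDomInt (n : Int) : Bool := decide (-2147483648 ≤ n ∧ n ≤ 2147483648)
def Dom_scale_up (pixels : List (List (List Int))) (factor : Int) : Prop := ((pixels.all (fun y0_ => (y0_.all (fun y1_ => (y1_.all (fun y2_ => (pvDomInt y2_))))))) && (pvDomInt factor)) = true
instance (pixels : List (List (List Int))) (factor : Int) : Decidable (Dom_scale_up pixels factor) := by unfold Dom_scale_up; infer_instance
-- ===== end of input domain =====

-- B changes the decomposition: instead of A's replicate-and-copy buffer building, each output
-- coordinate back-samples its source pixel via integer division (objective: alternative).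

-- ===== PORT A =====
def scale_up (pixels : List (List (List Int))) (factor : Int) : List (List (List Int)) :=
  pixels.foldl (fun scaled row =>
    -- big_row.extend([px] * factor)
    let big_row := row.foldl (fun br px => br ++ PySem.List.pyRepeat [px] factor) []
    -- for _ in range(factor): scaled.append(big_row[:])  (the [:] copy is value-identity)
    (PySem.List.pyRange 0 factor 1).foldl (fun s _ => s ++ [big_row]) scaled) []

-- ===== PORT B =====
-- pixels[i // factor] / src[j // factor]: the index is always in range when the enclosing
-- range is nonempty, so the total pyGetD with default [] is exact here.
def scale_up_alt (pixels : List (List (List Int))) (factor : Int) : List (List (List Int)) :=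
  (PySem.List.pyRange 0 (pixels.length * factor) 1).map (fun i =>
    let src := PySem.List.pyGetD pixels (PySem.Int.floordiv i factor) []
    (PySem.List.pyRange 0 (src.length * factor) 1).map (fun j =>
      PySem.List.pyGetD src (PySem.Int.floordiv j factor) []))

-- ===== PRECONDITION & SPEC =====
def Spec_scale_up (pixels : List (List (List Int))) (factor : Int) (out : List (List (List Int))) : Prop := out = scale_up_alt pixels factor
instance (pixels : List (List (List Int))) (factor : Int) (out : List (List (List Int))) : Decidable (Spec_scale_up pixels factor out) := by unfold Spec_scale_up; infer_instance

-- ===== CLAIM (what is proved, stated in full; the proofs are below) =====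
def Claim_equal_scale_up : Prop := ∀ (pixels : List (List (List Int))) (factor : Int), Dom_scale_up pixels factor → Spec_scale_up pixels factor (scale_up pixels factor)

-- ===== LEMMAS AND PROOFS =====

theorem pv_getD_cons_succ {α : Type} (x : α) (t : List α) (d : α) (j : Int) (hj : 0 ≤ j) :
    PySem.List.pyGetD (x :: t) (j + 1) d = PySem.List.pyGetD t j d := by
  obtain ⟨m, rfl⟩ := Int.eq_ofNat_of_zero_le hj
  have : ((m : Int) + 1) = ((m + 1 : Nat) : Int) := by push_cast; ring
  rw [this, PySem.List.pyGetD_natCast, PySem.List.pyGetD_natCast]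
  simp

-- back-sampling over a range of length len*f is nearest-neighbour replication
theorem pv_backsample {α β : Type} (f : Int) (hf : 0 < f) (d : α) (h : α → β) :
    ∀ (xs : List α),
      (PySem.List.pyRange 0 (xs.length * f) 1).map
        (fun i => h (PySem.List.pyGetD xs (PySem.Int.floordiv i f) d))
      = xs.flatMap (fun x => List.replicate f.toNat (h x)) := by
  intro xs
  induction xs with
  | nil => simp [PySem.List.pyRange_one_eq_nil]
  | cons x t ih =>
    have hlen : ((x :: t).length : Int) * f = (t.length : Int) * f + f := by
      push_cast [List.length_cons]; ring
    rw [hlen, PySem.List.pyRange_one_append 0 f ((t.length : Int) * f + f)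
      (le_of_lt hf) (by nlinarith [Int.natCast_nonneg t.length]), List.map_append, List.flatMap_cons]
    congr 1
    · -- first block: every index floordivides to 0, giving replicate factor (h x)
      rw [List.map_congr_left (g := fun _ => h x) ?_, List.map_const',
        PySem.List.length_pyRange_one]
      · norm_num
      · intro i hi
        rw [PySem.List.mem_pyRange_one] at hi
        have h0 : PySem.Int.floordiv i f = 0 := by
          rw [PySem.Int.floordiv_eq_iff_of_pos hf]; constructor <;> omega
        rw [h0, PySem.List.pyGetD_zero_cons]
    · -- remaining blocks: shift the index by f and use the IH
      simp only [PySem.List.pyRange_one, List.map_map, zero_add, Int.sub_zero] at ih ⊢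
      rw [show ((t.length : Int) * f + f - f) = (t.length : Int) * f by ring, ← ih]
      apply List.map_congr_left
      intro k _
      simp only [Function.comp_apply]
      have hfd : PySem.Int.floordiv (f + (k : Int)) f = PySem.Int.floordiv (k : Int) f + 1 := by
        rw [PySem.Int.floordiv_eq_ediv_of_pos hf, PySem.Int.floordiv_eq_ediv_of_pos hf,
          show f + (k : Int) = (k : Int) + 1 * f by ring, Int.add_mul_ediv_right _ _ (by omega)]
      rw [hfd, pv_getD_cons_succ _ _ _ _ (by
        rw [PySem.Int.floordiv_eq_ediv_of_pos hf]
        exact Int.ediv_nonneg (by positivity) (by omega))]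

theorem pv_A_shape (pixels : List (List (List Int))) (f : Int) :
    scale_up pixels f
      = pixels.flatMap (fun row =>
          List.replicate f.toNat (row.flatMap (fun px => List.replicate f.toNat px))) := by
  unfold scale_up
  simp only [PySem.List.pyRepeat_singleton, PySem.List.foldl_append_eq_flatMap,
    List.nil_append]
  congr 1
  funext row
  have h : ∀ (l : List Int),
      l.flatMap (fun _ => [row.flatMap fun px => List.replicate f.toNat px])
        = List.replicate l.length (row.flatMap fun px => List.replicate f.toNat px) := by
    intro l; induction l with
    | nil => simp
    | cons y t ih => simp [ih, List.replicate_succ]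
  rw [h, PySem.List.length_pyRange_one]
  norm_num

theorem pv_B_shape (pixels : List (List (List Int))) (f : Int) :
    scale_up_alt pixels f
      = pixels.flatMap (fun row =>
          List.replicate f.toNat (row.flatMap (fun px => List.replicate f.toNat px))) := by
  unfold scale_up_alt
  dsimp only
  by_cases hf : 0 < f
  · rw [pv_backsample f hf []
      (fun src => List.map (fun j => PySem.List.pyGetD src (PySem.Int.floordiv j f) [])
        (PySem.List.pyRange 0 ((src.length : Int) * f) 1)) pixels]
    congr 1
    funext row
    congr 1
    exact pv_backsample f hf [] id row
  · have h1 : (pixels.length : Int) * f ≤ 0 :=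
      mul_nonpos_of_nonneg_of_nonpos (by positivity) (by omega)
    rw [PySem.List.pyRange_one_eq_nil h1]
    have h2 : f.toNat = 0 := Int.toNat_of_nonpos (by omega)
    simp [h2]

-- ===== VERDICT (by name: the statement is the Claim_ definition above) =====
theorem scale_up_spec : Claim_equal_scale_up := by
  intro pixels factor _
  unfold Spec_scale_up
  rw [pv_A_shape, pv_B_shape]
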